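-- pv_equiv track=rewrite | github.com/VidyaRani53/Python_Programs | characterstuufing.py | unstuff_data
-- ===== SOURCE A (Python) =====
-- START = '$'
--
-- END = '$'
--
-- ESC = '*'
--
-- def unstuff_data(framed_data):
--     if framed_data[0] != START or framed_data[-1] != END:
--         raise ValueError("Invalid framed format")
--
--     data = []
--     i = 1
--     while i < len(framed_data) - 1:
--         byte = framed_data[i]
--         if byte == ESC:
--             i += 1  # Skip ESC and take next character
--             if i < len(framed_data) - 1:
--                 data.append(framed_data[i])
--         else:
--             data.append(byte)
--         i += 1
--     return data
-- ===== SOURCE B (Python) =====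
-- START = '$'
--
-- END = '$'
--
-- ESC = '*'
--
-- def unstuff_data(framed_data):
--     if framed_data[0] != START or framed_data[-1] != END:
--         raise ValueError("Invalid framed format")
--
--     # Stage 1: split the interior into maximal runs of ESC / non-ESC characters.
--     runs = []
--     current = []
--     for byte in framed_data[1:-1]:
--         if current and (current[0] == ESC) == (byte == ESC):
--             current.append(byte)
--         else:
--             if current:
--                 runs.append(current)
--             current = [byte]
--     if current:
--         runs.append(current)
--
--     # Stage 2: a run of k ESCs unstuffs to k // 2 ESCs; other runs pass through.
--     data = []
--     for run in runs:
--         if run[0] == ESC: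
--             data += [ESC] * (len(run) // 2)
--         else:
--             data += run
--     return data
-- ===== Notes on version B (the rewrite author's own statement) =====
-- stated objective: alternative
-- what changed: Replaces the index-skipping escape state machine by a two-stage run-length algorithm: first split the interior into maximal runs of ESC / non-ESC characters, then emit k//2 ESCs for each ESC-run of length k and pass other runs through unchanged.
import Mathlib
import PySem

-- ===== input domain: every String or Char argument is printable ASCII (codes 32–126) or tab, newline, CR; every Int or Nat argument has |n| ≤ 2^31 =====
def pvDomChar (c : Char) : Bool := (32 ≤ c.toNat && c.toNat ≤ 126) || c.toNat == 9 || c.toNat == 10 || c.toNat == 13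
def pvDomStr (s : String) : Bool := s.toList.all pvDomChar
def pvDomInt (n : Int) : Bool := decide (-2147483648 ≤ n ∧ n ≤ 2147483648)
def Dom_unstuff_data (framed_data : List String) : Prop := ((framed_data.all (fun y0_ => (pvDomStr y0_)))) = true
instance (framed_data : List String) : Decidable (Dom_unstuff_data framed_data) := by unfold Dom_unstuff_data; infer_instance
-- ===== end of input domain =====

-- B replaces A's index-skipping escape state machine by a two-stage run-length
-- algorithm: split the interior into maximal ESC / non-ESC runs, then emit
-- k // 2 ESCs per ESC-run of length k and pass other runs through; same cost.

-- ===== PORT A =====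
-- A's while loop: i walks the interior indices, ESC skips ahead and takes the next
-- character only if it is still inside the interior.
def unstuffLoopA (fd : List String) (i : Nat) (data : List String) : List String :=
  if _h : i < fd.length - 1 then
    let byte := fd.getD i ""
    if byte = "*" then
      let i' := i + 1
      let data' := if i' < fd.length - 1 then data ++ [fd.getD i' ""] else data
      unstuffLoopA fd (i' + 1) data'
    else
      unstuffLoopA fd (i + 1) (data ++ [byte])
  else data
termination_by fd.length - 1 - i

def unstuff_data (framed_data : List String) : List String :=
  -- Python raises (IndexError/ValueError) exactly when the frame check fails; those
  -- inputs are excluded by Pre_; the port returns [] there.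
  if PySem.List.pyGet? framed_data 0 ≠ some "$" ∨
     PySem.List.pyGet? framed_data (-1) ≠ some "$" then []
  else unstuffLoopA framed_data 1 []

-- ===== PORT B =====
-- stage 1 loop body: extend the current run or close it and start a new one
def runStep (st : List (List String) × List String) (byte : String) :
    List (List String) × List String :=
  if st.2 ≠ [] ∧ ((st.2.headD "" = "*") ↔ (byte = "*")) then (st.1, st.2 ++ [byte])
  else ((if st.2 ≠ [] then st.1 ++ [st.2] else st.1), [byte])

-- stage 2 loop body: a run of k ESCs contributes k / 2 ESCs, other runs pass through
def emitRun (data : List String) (run : List String) : List String :=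
  if run.headD "" = "*" then data ++ List.replicate (run.length / 2) "*" else data ++ run

def unstuff_data_alt (framed_data : List String) : List String :=
  if PySem.List.pyGet? framed_data 0 ≠ some "$" ∨
     PySem.List.pyGet? framed_data (-1) ≠ some "$" then []
  else
    let p := (PySem.List.slice framed_data (some 1) (some (-1))).foldl runStep ([], [])
    let runs := if p.2 ≠ [] then p.1 ++ [p.2] else p.1
    runs.foldl emitRun []

-- ===== PRECONDITION & SPEC =====
-- Pre_ excludes exactly the inputs where A raises: the empty list (IndexError) and
-- frames not starting and ending with '$' (ValueError).
def Pre_unstuff_data (framed_data : List String) : Prop :=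
  framed_data.head? = some "$" ∧ framed_data.getLast? = some "$"
instance (framed_data : List String) : Decidable (Pre_unstuff_data framed_data) := by
  unfold Pre_unstuff_data; infer_instance

def pvWitness_unstuff_data : List String := ["$", "a", "*", "*", "b", "$"]

def Spec_unstuff_data (framed_data : List String) (out : List String) : Prop := out = unstuff_data_alt framed_data
instance (framed_data : List String) (out : List String) : Decidable (Spec_unstuff_data framed_data out) := by unfold Spec_unstuff_data; infer_instance

-- ===== CLAIM (what is proved, stated in full; the proofs are below) =====
def Claim_equal_unstuff_data : Prop := ∀ (framed_data : List String), Dom_unstuff_data framed_data → Pre_unstuff_data framed_data → Spec_unstuff_data framed_data (unstuff_data framed_data)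

-- ===== LEMMAS AND PROOFS =====

-- the common unstuffing of an interior list
def core : List String → List String
  | [] => []
  | b :: rest =>
    if b = "*" then
      match rest with
      | [] => []
      | c :: rest' => c :: core rest'
    else b :: core rest

def coreT : List String → List String
  | [] => []
  | c :: rest => c :: core rest

theorem core_star (rest : List String) : core ("*" :: rest) = coreT rest := by
  rw [core.eq_def]; cases rest <;> simp [coreT]

theorem core_cons (b : String) (rest : List String) (hb : b ≠ "*") :
    core (b :: rest) = b :: core rest := by
  rw [core.eq_def]; simp [hb]

theorem loopA_core (fd : List String) (i : Nat) (data : List String) :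
    unstuffLoopA fd i data = data ++ core ((fd.take (fd.length - 1)).drop i) := by
  by_cases h : i < fd.length - 1
  · have hlen : ((fd.take (fd.length - 1))).length = fd.length - 1 := by
      rw [List.length_take]; omega
    have hi : i < (fd.take (fd.length - 1)).length := by omega
    have hcons := List.drop_eq_getElem_cons hi
    have hget : (fd.take (fd.length - 1))[i] = fd[i]'(by omega) := by
      simp [List.getElem_take]
    have hgd : fd.getD i "" = fd[i]'(by omega) := List.getD_eq_getElem _ _ (by omega)
    rw [unstuffLoopA]
    simp only [h, dif_pos]
    by_cases hb : fd.getD i "" = "*"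
    · simp only [hb, if_true]
      by_cases h2 : i + 1 < fd.length - 1
      · have hi2 : i + 1 < (fd.take (fd.length - 1)).length := by omega
        have hcons2 := List.drop_eq_getElem_cons hi2
        have hget2 : (fd.take (fd.length - 1))[i+1] = fd[i+1]'(by omega) := by
          simp [List.getElem_take]
        have hgd2 : fd.getD (i+1) "" = fd[i+1]'(by omega) := List.getD_eq_getElem _ _ (by omega)
        rw [if_pos h2, loopA_core fd (i + 1 + 1) (data ++ [fd.getD (i+1) ""])]
        rw [hcons, hcons2, hget, hget2, hgd2]
        have hstar : fd[i]'(by omega) = "*" := by rw [← hgd, hb]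
        simp [core_star, hstar, coreT, List.append_assoc]
      · rw [if_neg h2, loopA_core fd (i + 1 + 1) data]
        have hdrop : (fd.take (fd.length - 1)).drop (i + 1) = [] := by
          apply List.drop_eq_nil_of_le; omega
        have hdrop2 : (fd.take (fd.length - 1)).drop (i + 1 + 1) = [] := by
          apply List.drop_eq_nil_of_le; omega
        rw [hcons, hdrop, hdrop2]
        have hstar : fd[i]'(by omega) = "*" := by rw [← hgd, hb]
        simp [hget, hstar, core]
    · simp only [hb, if_false]
      rw [loopA_core fd (i + 1) (data ++ [fd.getD i ""])]
      rw [hcons, hget, hgd]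
      have hb' : fd[i]'(by omega) ≠ "*" := by rw [← hgd]; exact hb
      simp [core_cons _ _ hb', List.append_assoc]
  · rw [unstuffLoopA]
    have hdrop : (fd.take (fd.length - 1)).drop i = [] := by
      apply List.drop_eq_nil_of_le
      rw [List.length_take]; omega
    simp [h, hdrop, core]
termination_by fd.length - 1 - i

theorem slice_interior (fd : List String) (h : fd ≠ []) :
    PySem.List.slice fd (some 1) (some (-1)) = (fd.take (fd.length - 1)).drop 1 := by
  have hl : 1 ≤ fd.length := List.length_pos_iff.mpr h
  have ht : ((fd.length : Int) + -1).toNat = fd.length - 1 := by omega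
  simp [PySem.List.slice, PySem.List.clampIdx, h, ht, Nat.min_eq_left hl, List.drop_take]

-- B-side characterisation ------------------------------------------------------

def emit1 (run : List String) : List String :=
  if run.headD "" = "*" then List.replicate (run.length / 2) "*" else run

theorem stage2_flatMap (runs : List (List String)) (acc : List String) :
    runs.foldl emitRun acc = acc ++ runs.flatMap emit1 := by
  induction runs generalizing acc with
  | nil => simp
  | cons r rs ih =>
    simp only [List.foldl, List.flatMap_cons, ih, emitRun, emit1]
    split <;> simp [List.append_assoc]

-- pending ESC-run of length k followed by L, as a value
def Hk (k : Nat) (L : List String) : List String :=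
  List.replicate (k / 2) "*" ++ (if k % 2 = 1 then coreT L else core L)

-- what remains to be emitted given the pending run cur and the remaining input L
def K (cur : List String) (L : List String) : List String :=
  if cur = [] then core L
  else if cur.headD "" = "*" then Hk cur.length L
  else cur ++ core L

theorem Hk_nil (k : Nat) : Hk k [] = List.replicate (k / 2) "*" := by
  simp [Hk, core, coreT]

theorem Hk_star (k : Nat) (L : List String) : Hk k ("*" :: L) = Hk (k + 1) L := by
  rcases Nat.even_or_odd k with ⟨m, hm⟩ | ⟨m, hm⟩
  · have h1 : k % 2 = 0 := by omega
    have h2 : (k + 1) % 2 = 1 := by omega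
    have h3 : (k + 1) / 2 = k / 2 := by omega
    simp [Hk, h1, h2, h3, core_star]
  · have h1 : k % 2 = 1 := by omega
    have h2 : (k + 1) % 2 = 0 := by omega
    have h3 : (k + 1) / 2 = k / 2 + 1 := by omega
    simp [Hk, h1, h2, h3, coreT, List.replicate_succ', List.append_assoc]

theorem Hk_cons (k : Nat) (b : String) (L : List String) (hb : b ≠ "*") :
    Hk k (b :: L) = List.replicate (k / 2) "*" ++ b :: core L := by
  rcases Nat.even_or_odd k with ⟨m, hm⟩ | ⟨m, hm⟩
  · have h1 : k % 2 = 0 := by omega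
    simp [Hk, h1, core_cons b L hb]
  · have h1 : k % 2 = 1 := by omega
    simp [Hk, h1, coreT]

-- main invariant of B's stage-1 fold, read through stage 2
theorem main_inv (L : List String) (runs : List (List String)) (cur : List String) :
    (let p := L.foldl runStep (runs, cur);
     (if p.2 ≠ [] then p.1 ++ [p.2] else p.1).flatMap emit1)
    = runs.flatMap emit1 ++ K cur L := by
  induction L generalizing runs cur with
  | nil =>
    match cur with
    | [] => simp [K, core]
    | x :: xs =>
      by_cases hs : x = "*"
      · simp [hs, K, emit1, Hk_nil]
      · simp [hs, K, emit1, core]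
  | cons b L ih =>
    simp only [List.foldl]
    match cur with
    | [] =>
      have hstep : runStep (runs, []) b = (runs, [b]) := by simp [runStep]
      rw [hstep, ih]
      by_cases hb : b = "*"
      · simp [K, hb, Hk, core_star]
      · simp [K, hb, core_cons b L hb]
    | x :: xs =>
      by_cases hsame : ((x = "*") ↔ (b = "*"))
      · have hstep : runStep (runs, x :: xs) b = (runs, (x :: xs) ++ [b]) := by
          simp [runStep, hsame]
        rw [hstep, ih]
        by_cases hs : x = "*"
        · have hb : b = "*" := hsame.mp hs
          simp only [K]
          simp [hs, hb, Hk_star]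
        · have hb : b ≠ "*" := fun h => hs (hsame.mpr h)
          simp only [K]
          simp [hs, core_cons b L hb, List.append_assoc]
      · have hstep : runStep (runs, x :: xs) b = (runs ++ [x :: xs], [b]) := by
          simp only [runStep]
          rw [if_neg (by simp; tauto)]
          simp
        rw [hstep, ih]
        by_cases hs : x = "*"
        · have hb : b ≠ "*" := fun h => hsame ⟨fun _ => h, fun _ => hs⟩
          simp only [K]
          simp [hs, hb, emit1, Hk_cons (xs.length + 1) b L hb, List.append_assoc]
        · have hb : b = "*" := by
            by_contra hb
            exact hsame ⟨fun h => absurd h hs, fun h => absurd h hb⟩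
          simp only [K]
          simp [hs, hb, emit1, Hk, core_star, List.append_assoc]

theorem alt_core (interior : List String) :
    ((let p := interior.foldl runStep (([] : List (List String)), ([] : List String));
      (if p.2 ≠ [] then p.1 ++ [p.2] else p.1)).foldl emitRun [])
    = core interior := by
  rw [stage2_flatMap]
  simpa [K] using main_inv interior [] []

-- ===== VERDICT (by name: the statement is the Claim_ definition above) =====
theorem unstuff_data_spec : Claim_equal_unstuff_data := by
  intro fd _hdom hpre
  obtain ⟨hhead, hlast⟩ := hpre
  have hne : fd ≠ [] := by intro h; subst h; simp at hhead
  unfold Spec_unstuff_data unstuff_data unstuff_data_alt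
  rw [slice_interior fd hne]
  rw [loopA_core]
  split
  · rfl
  · exact (alt_core _).symm
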